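-- pv_equiv track=rewrite | github.com/rares-p/Python | lab2/main.py | ex12
-- ===== SOURCE A (Python) =====
-- def ex12(words: list[str]) -> list[list[str]]:
--     result = {}
--     for word in words:
--         if word[-2:] in result:
--             result[word[-2:]].append(word)
--         else:
--             result[word[-2:]] = [word]
--     return list(result.values())
-- ===== SOURCE B (Python) =====
-- def ex12(words: list[str]) -> list[list[str]]:
--     seen = []
--     for word in words:
--         suffix = word[-2:]
--         if suffix not in seen:
--             seen.append(suffix)
--     return [[word for word in words if word[-2:] == s] for s in seen]
-- ===== Notes on version B (the rewrite author's own statement) =====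
-- stated objective: alternative
-- what changed: Replaces the single-pass dict accumulation with a two-phase group-by: first collect the distinct last-two-char suffixes in order of first appearance, then build each group by filtering the word list per suffix.
import Mathlib
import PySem

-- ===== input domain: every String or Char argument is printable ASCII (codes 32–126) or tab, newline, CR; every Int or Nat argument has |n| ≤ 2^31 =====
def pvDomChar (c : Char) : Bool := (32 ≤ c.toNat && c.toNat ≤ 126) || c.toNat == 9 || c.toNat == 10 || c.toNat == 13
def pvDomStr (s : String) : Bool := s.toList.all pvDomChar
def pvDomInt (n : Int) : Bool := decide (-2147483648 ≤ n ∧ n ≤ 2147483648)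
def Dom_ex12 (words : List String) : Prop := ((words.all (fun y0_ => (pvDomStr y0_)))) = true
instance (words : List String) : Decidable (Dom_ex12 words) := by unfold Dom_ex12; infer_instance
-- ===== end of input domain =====

-- B groups words by their last-two-character suffix via a suffix index + per-suffix filter instead of A's dict accumulation; same return value (alternative decomposition, not faster).

-- w[-2:]
def pySuf (w : String) : String := PySem.Str.slice w (some (-2)) none

-- ===== PORT A =====
def ex12 (words : List String) : List (List String) :=
  (words.foldl (fun result word =>
      if result.contains (pySuf word) then
        result.modify (pySuf word) [] (fun l => l ++ [word])
      else
        result.insert (pySuf word) [word])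
    PySem.Dict.empty).values

-- ===== PORT B =====
def ex12_alt (words : List String) : List (List String) :=
  let seen := words.foldl (fun seen word =>
      if pySuf word ∈ seen then seen else seen ++ [pySuf word]) []
  seen.map (fun s => words.filter (fun word => pySuf word == s))

-- ===== PRECONDITION & SPEC =====
def Spec_ex12 (words : List String) (out : List (List String)) : Prop := out = ex12_alt words
instance (words : List String) (out : List (List String)) : Decidable (Spec_ex12 words out) := by unfold Spec_ex12; infer_instance

-- ===== CLAIM (what is proved, stated in full; the proofs are below) =====
def Claim_equal_ex12 : Prop := ∀ (words : List String), Dom_ex12 words → Spec_ex12 words (ex12 words)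

-- ===== LEMMAS AND PROOFS =====

-- A's if/else step is exactly a 'modify with default []' step.
theorem ex12_stepA_eq (d : PySem.Dict String (List String)) (w : String) :
    (if d.contains (pySuf w) then d.modify (pySuf w) [] (fun l => l ++ [w])
     else d.insert (pySuf w) [w])
    = d.modify (pySuf w) [] (fun l => l ++ [w]) := by
  by_cases h : d.contains (pySuf w)
  · simp [h]
  · have hc : d.contains (pySuf w) = false := by simpa using h
    rw [if_neg h, PySem.Dict.modify, PySem.Dict.getD_of_not_contains _ _ hc, List.nil_append]

-- B's seen-loop step is Set.add.
theorem ex12_stepB_eq (s : List String) (w : String) :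
    (if pySuf w ∈ s then s else s ++ [pySuf w]) = PySem.Set.add s (pySuf w) := by
  by_cases h : pySuf w ∈ s <;> simp [PySem.Set.add, PySem.Set.contains, h]

-- A's dict lookup at any suffix is the filter B computes.
theorem ex12_getD (words : List String) (c : String) :
    (words.foldl (fun d w => d.modify (pySuf w) [] (fun l => l ++ [w]))
        PySem.Dict.empty).getD c []
    = words.filter (fun w => pySuf w == c) := by
  have hmap : words.foldl (fun d w => d.modify (pySuf w) [] (fun l => l ++ [w]))
        PySem.Dict.empty
      = (words.map (fun w => (pySuf w, w))).foldl
          (fun d p => d.modify p.1 [] (fun l => l ++ [p.2])) PySem.Dict.empty := by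
    rw [List.foldl_map]
  rw [hmap, PySem.Dict.getD_foldl_modify_append]
  simp [List.filter_map, Function.comp_def]

theorem ex12_spec_aux (words : List String) : ex12 words = ex12_alt words := by
  unfold ex12 ex12_alt
  have hA : (fun (d : PySem.Dict String (List String)) (w : String) =>
      if d.contains (pySuf w) then d.modify (pySuf w) [] (fun l => l ++ [w])
      else d.insert (pySuf w) [w])
      = fun d w => d.modify (pySuf w) [] (fun l => l ++ [w]) := by
    funext d w; exact ex12_stepA_eq d w
  have hB : (fun (s : List String) (w : String) =>
      if pySuf w ∈ s then s else s ++ [pySuf w])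
      = fun s w => PySem.Set.add s (pySuf w) := by
    funext s w; exact ex12_stepB_eq s w
  rw [hA, hB]
  have hseen : words.foldl (fun s w => PySem.Set.add s (pySuf w)) []
      = PySem.Set.ofList (words.map pySuf) := by
    rw [PySem.Set.ofList, List.foldl_map]; rfl
  set d := words.foldl (fun d w => d.modify (pySuf w) [] (fun l => l ++ [w]))
      PySem.Dict.empty with hd
  have hkeys : d.keys = PySem.Set.ofList (words.map pySuf) := by
    rw [hd, PySem.Dict.keys_foldl_modify_key words pySuf [] (fun _ w => fun l => l ++ [w])]
    simp [PySem.Set.update, PySem.Set.ofList, PySem.Set.empty]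
  have hnd : d.keys.Nodup := by
    rw [hd]
    exact PySem.Dict.nodup_keys_foldl_modify_key words pySuf [] _ _ (by simp)
  rw [PySem.Dict.values_eq_map_keys d hnd [], hkeys, hseen]
  refine List.map_congr_left (fun s _ => ?_)
  rw [hd, ex12_getD]

-- ===== VERDICT (by name: the statement is the Claim_ definition above) =====
theorem ex12_spec : Claim_equal_ex12 := by
  intro words _
  exact ex12_spec_aux words
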